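-- pv_equiv track=rewrite | github.com/raghav-1998/Problem-of-the-day-GFG | Nearest smaller tower/Nearest-smaller-tower.py | nearestSmallestTower
-- ===== SOURCE A (Python) =====
-- def nearestSmallestTower(a):
--     #code here
--     n=len(a)
--     k=[]
--     t=min(a)
--     for i in range(0,n):
--         t1=0
--         t2=0
--         if a[i]==t:
--             k.append(-1)
--         else:
--             if i+1<n:
--                 for r in range(i+1,n):
--                     if a[r]<a[i]:
--                         t1=1
--                         break
--             if i-1>=0:
--                 for l in range(i-1,-1,-1):
--                     if a[l]<a[i]:
--                         t2=1
--                         break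
--             if t1==0:
--                 k.append(l)
--             elif t2==0:
--                 k.append(r)
--             elif abs(i-r)>(i-l):
--                 k.append(l)
--             elif abs(i-r)<(i-l):
--                 k.append(r)
--             else:
--                 if a[r]>a[l]:
--                     k.append(l)
--                 elif a[l]>a[r]:
--                     k.append(r)
--                 else:
--                     k.append(l)
--     return k
-- ===== SOURCE B (Python) =====
-- def nearestSmallestTower(a):
--     n = len(a)
--
--     def scan(order):
--         st = []
--         out = []
--         for i in order:
--             while st and a[st[-1]] >= a[i]:
--                 st.pop()
--             out.append(st[-1] if st else -1)
--             st.append(i)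
--         return out
--
--     nsl = scan(range(n))
--     nsr = scan(range(n - 1, -1, -1))[::-1]
--     res = []
--     for i in range(n):
--         l, r = nsl[i], nsr[i]
--         if l < 0 and r < 0:
--             res.append(-1)
--         elif r < 0:
--             res.append(l)
--         elif l < 0:
--             res.append(r)
--         elif i - l < r - i:
--             res.append(l)
--         elif r - i < i - l:
--             res.append(r)
--         else:
--             res.append(l if a[l] <= a[r] else r)
--     return res
-- ===== Notes on version B (the rewrite author's own statement) =====
-- stated objective: faster
-- what changed: Replaced A's per-element linear scans for the nearest smaller neighbour on each side by two monotonic-stack passes that compute all nearest-smaller-left and nearest-smaller-right indices in linear time, followed by the same distance/value/left tie-break combination.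
import Mathlib
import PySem

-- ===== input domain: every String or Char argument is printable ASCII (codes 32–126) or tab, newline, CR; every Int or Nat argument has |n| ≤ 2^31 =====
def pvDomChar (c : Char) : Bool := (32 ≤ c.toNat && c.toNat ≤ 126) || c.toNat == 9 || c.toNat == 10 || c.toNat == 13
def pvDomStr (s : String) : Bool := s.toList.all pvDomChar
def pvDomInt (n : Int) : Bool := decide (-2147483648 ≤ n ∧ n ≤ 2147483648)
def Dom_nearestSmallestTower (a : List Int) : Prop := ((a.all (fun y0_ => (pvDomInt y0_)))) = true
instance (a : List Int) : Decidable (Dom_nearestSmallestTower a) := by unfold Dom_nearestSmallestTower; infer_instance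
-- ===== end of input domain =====

-- B replaces A's quadratic per-element scans by two linear monotonic-stack passes
-- (nearest-smaller-left / nearest-smaller-right), then applies the same tie-break.

-- ===== PORT A =====
-- all list accesses below happen at indices that are provably in range, so a.getD j 0 is exact
def gi (a : List Int) (j : Nat) : Int := a.getD j 0

-- the inner 'for r in range(i+1,n): if a[r]<a[i]: t1=1; break' loop; some r = broke (t1=1), none = fell through (t1=0)
def scanR (a : List Int) (x : Int) (r : Nat) : Option Nat :=
  if h : r < a.length then
    if gi a r < x then some r else scanR a x (r + 1)
  else none
termination_by a.length - r
decreasing_by omega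

-- the inner 'for l in range(i-1,-1,-1): if a[l]<a[i]: t2=1; break' loop; some l = broke (t2=1)
def scanL (a : List Int) (x : Int) (l : Nat) : Option Nat :=
  if gi a l < x then some l
  else if l = 0 then none
  else scanL a x (l - 1)
termination_by l

def nearestSmallestTower (a : List Int) : List Int :=
  match PySem.List.min? a (fun y => y) with
  | none => []  -- Python: min([]) raises ValueError here; excluded by Pre_
  | some t =>
    (List.range a.length).map (fun i =>
      if gi a i = t then -1
      else
        let t1 : Option Nat := if i + 1 < a.length then scanR a (gi a i) (i + 1) else none
        let t2 : Option Nat := if 1 ≤ i then scanL a (gi a i) (i - 1) else none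
        match t1, t2 with
        | none, some l => (l : Int)        -- t1==0: Python's l is the break index of the left loop
        | some r, none => (r : Int)        -- t2==0: Python's r is the break index of the right loop
        | some r, some l =>
          if (r : Int) - (i : Int) > (i : Int) - (l : Int) then (l : Int)
          else if (r : Int) - (i : Int) < (i : Int) - (l : Int) then (r : Int)
          else if gi a r > gi a l then (l : Int)
          else if gi a l > gi a r then (r : Int)
          else (l : Int)
        | none, none => -1)  -- unreachable when a[i] ≠ min a: a smaller element exists on some side

-- ===== PORT B =====
-- 'while st and a[st[-1]] >= a[i]: st.pop()'  (stack top at the head)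
def popGE (a : List Int) (x : Int) (st : List Nat) : List Nat :=
  match st with
  | [] => []
  | j :: rest => if gi a j ≥ x then popGE a x rest else j :: rest

-- the 'scan(order)' helper of Source B: one monotonic-stack pass over the given index order
def nsScan (a : List Int) (order : List Nat) (st : List Nat) (out : List Int) : List Nat × List Int :=
  match order with
  | [] => (st, out)
  | i :: rest =>
    let st' := popGE a (gi a i) st
    let v : Int := match st' with | [] => -1 | j :: _ => (j : Int)
    nsScan a rest (i :: st') (out ++ [v])

def nearestSmallestTower_alt (a : List Int) : List Int :=
  let n := a.length
  let nsl := (nsScan a (List.range n) [] []).2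
  let nsr := ((nsScan a (List.range n).reverse [] []).2).reverse
  (List.range n).map (fun i =>
    let l := nsl.getD i 0
    let r := nsr.getD i 0
    if l < 0 ∧ r < 0 then -1
    else if r < 0 then l
    else if l < 0 then r
    else if (i : Int) - l < r - (i : Int) then l
    else if r - (i : Int) < (i : Int) - l then r
    else if gi a l.toNat ≤ gi a r.toNat then l else r)

-- ===== PRECONDITION & SPEC =====
-- Pre_ excludes only the empty list, on which Python's min(a) raises ValueError.
def Pre_nearestSmallestTower (a : List Int) : Prop := a ≠ []
instance (a : List Int) : Decidable (Pre_nearestSmallestTower a) := by unfold Pre_nearestSmallestTower; infer_instance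
def pvWitness_nearestSmallestTower : List Int := [2, 1, 3]

def Spec_nearestSmallestTower (a : List Int) (out : List Int) : Prop := out = nearestSmallestTower_alt a
instance (a : List Int) (out : List Int) : Decidable (Spec_nearestSmallestTower a out) := by unfold Spec_nearestSmallestTower; infer_instance

-- ===== CLAIM (what is proved, stated in full; the proofs are below) =====
def Claim_equal_nearestSmallestTower : Prop := ∀ (a : List Int), Dom_nearestSmallestTower a → Pre_nearestSmallestTower a → Spec_nearestSmallestTower a (nearestSmallestTower a)

-- ===== LEMMAS AND PROOFS =====

lemma find?_sublist_eq {α : Type} (p : α → Bool) (rel : α → α → Prop)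
    (hasym : ∀ x y, rel x y → rel y x → False)
    (R st : List α) (hsub : st.Sublist R) (hpw : R.Pairwise rel)
    (hcond : ∀ j ∈ R, j ∉ st → p j = true → ∃ k ∈ st, rel k j ∧ p k = true) :
    st.find? p = R.find? p := by
  induction hsub with
  | slnil => rfl
  | @cons l₁ l₂ b hsub ih =>
    have hb : p b = false := by
      by_contra h
      have hpb : p b = true := by simpa using h
      have hbst : b ∉ l₁ := by
        intro hmem
        have hbl₂ : b ∈ l₂ := hsub.subset hmem
        exact hasym b b (List.rel_of_pairwise_cons hpw hbl₂) (List.rel_of_pairwise_cons hpw hbl₂)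
      obtain ⟨k, hk, hrel, hpk⟩ := hcond b (List.mem_cons_self) hbst hpb
      exact hasym b k (List.rel_of_pairwise_cons hpw (hsub.subset hk)) hrel
    rw [List.find?_cons_of_neg (by simp [hb])]
    exact ih (List.Pairwise.of_cons hpw)
      (fun j hj hjn hpj => hcond j (List.mem_cons_of_mem _ hj) hjn hpj)
  | @cons₂ l₁ l₂ b hsub ih =>
    by_cases hp : p b = true
    · rw [List.find?_cons_of_pos hp, List.find?_cons_of_pos hp]
    · have hb : p b = false := by simpa using hp
      rw [List.find?_cons_of_neg (by simp [hb]), List.find?_cons_of_neg (by simp [hb])]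
      refine ih (List.Pairwise.of_cons hpw) (fun j hj hjn hpj => ?_)
      have hjb : j ≠ b := by rintro rfl; rw [hpj] at hb; simp at hb
      obtain ⟨k, hk, hrel, hpk⟩ := hcond j (List.mem_cons_of_mem _ hj)
        (by simp [hjb, hjn]) hpj
      have hkb : k ≠ b := by rintro rfl; rw [hpk] at hb; simp at hb
      refine ⟨k, ?_, hrel, hpk⟩
      rcases List.mem_cons.mp hk with h | h
      · exact absurd h hkb
      · exact h

lemma popGE_head? (a : List Int) (x : Int) (st : List Nat) :
    (popGE a x st).head? = st.find? (fun j => decide (gi a j < x)) := by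
  induction st with
  | nil => rfl
  | cons j rest ih =>
    by_cases h : gi a j ≥ x
    · rw [show popGE a x (j :: rest) = popGE a x rest by simp [popGE, h],
        List.find?_cons_of_neg (by simp; omega)]
      exact ih
    · rw [show popGE a x (j :: rest) = j :: rest by simp [popGE, h],
        List.find?_cons_of_pos (by simp; omega)]
      rfl

lemma popGE_sublist (a : List Int) (x : Int) (st : List Nat) :
    (popGE a x st).Sublist st := by
  induction st with
  | nil => simp [popGE]
  | cons j rest ih =>
    by_cases h : gi a j ≥ x
    · simp only [popGE, if_pos h]; exact ih.cons j
    · simp only [popGE, if_neg h]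
      exact List.Sublist.refl _

lemma popGE_popped (a : List Int) (x : Int) (st : List Nat) :
    ∀ j ∈ st, j ∉ popGE a x st → x ≤ gi a j := by
  induction st with
  | nil => simp
  | cons j0 rest ih =>
    intro j hj hnj
    by_cases h : gi a j0 ≥ x
    · simp only [popGE, if_pos h] at hnj
      rcases List.mem_cons.mp hj with h' | h'
      · subst h'; omega
      · exact ih j h' hnj
    · simp only [popGE, if_neg h] at hnj
      exact absurd hj hnj

lemma scanR_eq (a : List Int) (x : Int) :
    ∀ c r, a.length - r = c → scanR a x r = (List.range' r c).find? (fun j => decide (gi a j < x)) := by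
  intro c
  induction c with
  | zero => intro r hr; rw [scanR]; simp only [List.range'_zero, List.find?_nil]; rw [dif_neg (by omega)]
  | succ c ih =>
    intro r hr
    rw [scanR, dif_pos (by omega), List.range'_succ]
    by_cases h : gi a r < x
    · rw [if_pos h, List.find?_cons_of_pos (by simpa using h)]
    · rw [if_neg h, List.find?_cons_of_neg (by simpa using h)]
      exact ih (r + 1) (by omega)

lemma scanL_eq (a : List Int) (x : Int) :
    ∀ l, scanL a x l = ((List.range (l + 1)).reverse).find? (fun j => decide (gi a j < x)) := by
  intro l
  induction l with
  | zero =>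
    rw [scanL]
    by_cases h : gi a 0 < x
    · rw [if_pos h]; simp [h]
    · rw [if_neg h]; simp [h]
  | succ l ih =>
    rw [scanL]
    have hrw : (List.range (l + 1 + 1)).reverse = (l + 1) :: (List.range (l + 1)).reverse := by
      rw [List.range_succ]; simp
    rw [hrw]
    by_cases h : gi a (l + 1) < x
    · rw [if_pos h, List.find?_cons_of_pos (by simpa using h)]
    · rw [if_neg h, List.find?_cons_of_neg (by simpa using h), if_neg (by omega)]
      simpa using ih

def nslSpec (a : List Int) (i : Nat) : Option Nat :=
  ((List.range i).reverse).find? (fun j => decide (gi a j < gi a i))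

def nsrSpec (a : List Int) (i : Nat) : Option Nat :=
  (List.range' (i + 1) (a.length - (i + 1))).find? (fun j => decide (gi a j < gi a i))

def InvL (a : List Int) (i : Nat) (st : List Nat) : Prop :=
  st.Sublist (List.range i).reverse ∧
  ∀ j ∈ (List.range i).reverse, j ∉ st → ∃ k ∈ st, j < k ∧ gi a k ≤ gi a j

def InvR (a : List Int) (i : Nat) (st : List Nat) : Prop :=
  st.Sublist (List.range' i (a.length - i)) ∧
  ∀ j ∈ List.range' i (a.length - i), j ∉ st → ∃ k ∈ st, k < j ∧ gi a k ≤ gi a j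

lemma invL_head (a : List Int) (i : Nat) (st : List Nat) (h : InvL a i st) :
    (popGE a (gi a i) st).head? = nslSpec a i := by
  rw [popGE_head?, nslSpec]
  refine find?_sublist_eq _ (fun x y => y < x) (fun x y h1 h2 => by omega) _ _ h.1
    (List.pairwise_reverse.mpr (by simpa using List.pairwise_lt_range)) ?_
  intro j hj hjn hpj
  obtain ⟨k, hk, hlt, hle⟩ := h.2 j hj hjn
  refine ⟨k, hk, hlt, ?_⟩
  simp only [decide_eq_true_eq] at hpj ⊢
  omega

lemma invR_head (a : List Int) (m : Nat) (st : List Nat) (h : InvR a (m + 1) st) :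
    (popGE a (gi a m) st).head? = nsrSpec a m := by
  rw [popGE_head?, nsrSpec]
  refine find?_sublist_eq _ (fun x y => x < y) (fun x y h1 h2 => by omega) _ _ h.1
    (List.pairwise_lt_range' 1) ?_
  intro j hj hjn hpj
  obtain ⟨k, hk, hlt, hle⟩ := h.2 j hj hjn
  refine ⟨k, hk, hlt, ?_⟩
  simp only [decide_eq_true_eq] at hpj ⊢
  omega

lemma invL_step (a : List Int) (i : Nat) (st : List Nat) (h : InvL a i st) :
    InvL a (i + 1) (i :: popGE a (gi a i) st) := by
  have hrw : (List.range (i + 1)).reverse = i :: (List.range i).reverse := by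
    rw [List.range_succ]; simp
  constructor
  · rw [hrw]
    exact ((popGE_sublist a (gi a i) st).trans h.1).cons₂ i
  · intro j hj hjn
    rw [hrw] at hj
    have hji : j ≠ i := fun hh => hjn (hh ▸ List.mem_cons_self)
    have hjR : j ∈ (List.range i).reverse := by
      rcases List.mem_cons.mp hj with h' | h'
      · exact absurd h' hji
      · exact h'
    have hjlt : j < i := by simpa using hjR
    by_cases hjst : j ∈ st
    · -- j was popped just now
      have hpop : j ∉ popGE a (gi a i) st := fun hh => hjn (List.mem_cons_of_mem _ hh)
      have := popGE_popped a (gi a i) st j hjst hpop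
      exact ⟨i, List.mem_cons_self, hjlt, this⟩
    · obtain ⟨k, hk, hlt, hle⟩ := h.2 j hjR hjst
      by_cases hks : k ∈ popGE a (gi a i) st
      · exact ⟨k, List.mem_cons_of_mem _ hks, hlt, hle⟩
      · have := popGE_popped a (gi a i) st k hk hks
        exact ⟨i, List.mem_cons_self, hjlt, by omega⟩

lemma invR_step (a : List Int) (m : Nat) (st : List Nat) (hm : m < a.length)
    (h : InvR a (m + 1) st) :
    InvR a m (m :: popGE a (gi a m) st) := by
  have hrw : List.range' m (a.length - m) = m :: List.range' (m + 1) (a.length - (m + 1)) := by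
    have : a.length - m = (a.length - (m + 1)) + 1 := by omega
    rw [this, List.range'_succ]
  constructor
  · rw [hrw]
    exact ((popGE_sublist a (gi a m) st).trans h.1).cons₂ m
  · intro j hj hjn
    rw [hrw] at hj
    have hji : j ≠ m := fun hh => hjn (hh ▸ List.mem_cons_self)
    have hjR : j ∈ List.range' (m + 1) (a.length - (m + 1)) := by
      rcases List.mem_cons.mp hj with h' | h'
      · exact absurd h' hji
      · exact h'
    have hjgt : m < j := by
      have := List.mem_range'.mp hjR
      omega
    by_cases hjst : j ∈ st
    · have hpop : j ∉ popGE a (gi a m) st := fun hh => hjn (List.mem_cons_of_mem _ hh)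
      have := popGE_popped a (gi a m) st j hjst hpop
      exact ⟨m, List.mem_cons_self, hjgt, this⟩
    · obtain ⟨k, hk, hlt, hle⟩ := h.2 j hjR hjst
      by_cases hks : k ∈ popGE a (gi a m) st
      · exact ⟨k, List.mem_cons_of_mem _ hks, hlt, hle⟩
      · have := popGE_popped a (gi a m) st k hk hks
        exact ⟨m, List.mem_cons_self, hjgt, by omega⟩

def optVal : Option Nat → Int
  | none => -1
  | some j => (j : Int)

lemma matchHead (st : List Nat) :
    (match st with | [] => (-1 : Int) | j :: _ => (j : Int)) = optVal st.head? := by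
  cases st <;> rfl

lemma nsScan_left (a : List Int) :
    ∀ c i st out, InvL a i st →
      (nsScan a (List.range' i c) st out).2
        = out ++ (List.range' i c).map (fun m => optVal (nslSpec a m)) := by
  intro c
  induction c with
  | zero => intro i st out _; simp [nsScan]
  | succ c ih =>
    intro i st out h
    rw [List.range'_succ]
    show (nsScan a (i :: List.range' (i + 1) c) st out).2 = _
    rw [nsScan]
    rw [matchHead, invL_head a i st h, ih (i + 1) _ _ (invL_step a i st h)]
    simp

lemma nsScan_right (a : List Int) :
    ∀ c st out, c ≤ a.length → InvR a c st →
      (nsScan a (List.range c).reverse st out).2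
        = out ++ ((List.range c).reverse).map (fun m => optVal (nsrSpec a m)) := by
  intro c
  induction c with
  | zero => intro st out _ _; simp [nsScan]
  | succ c ih =>
    intro st out hc h
    have hrw : (List.range (c + 1)).reverse = c :: (List.range c).reverse := by
      rw [List.range_succ]; simp
    rw [hrw]
    show (nsScan a (c :: (List.range c).reverse) st out).2 = _
    rw [nsScan]
    rw [matchHead, invR_head a c st h,
      ih _ _ (by omega) (invR_step a c st (by omega) h)]
    simp

lemma nsl_eq (a : List Int) :
    (nsScan a (List.range a.length) [] []).2
      = (List.range a.length).map (fun m => optVal (nslSpec a m)) := by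
  have h0 : InvL a 0 [] := ⟨by simp, by simp⟩
  have := nsScan_left a a.length 0 [] [] h0
  simpa [List.range_eq_range'] using this

lemma nsr_eq (a : List Int) :
    ((nsScan a (List.range a.length).reverse [] []).2).reverse
      = (List.range a.length).map (fun m => optVal (nsrSpec a m)) := by
  have h0 : InvR a a.length [] := ⟨by simp, by simp⟩
  have := nsScan_right a a.length [] [] le_rfl h0
  rw [this]
  simp [List.map_reverse]

lemma mapRange_getD {f : Nat → Int} {n i : Nat} (hi : i < n) :
    ((List.range n).map f).getD i 0 = f i := by
  simp [List.getD_eq_getElem?_getD, hi]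

lemma min_le_gi (a : List Int) (t : Int)
    (hmin : PySem.List.min? a (fun y => y) = some t) (j : Nat) (hj : j < a.length) :
    t ≤ gi a j := by
  have hmem : a.getD j 0 ∈ a := by
    rw [List.getD_eq_getElem?_getD, List.getElem?_eq_getElem hj]
    exact List.getElem_mem hj
  exact PySem.List.min?_isMin hmin _ hmem

lemma spec_none_of_min (a : List Int) (t : Int)
    (hmin : PySem.List.min? a (fun y => y) = some t) (i : Nat) (hi : i < a.length)
    (ht : gi a i = t) : nslSpec a i = none ∧ nsrSpec a i = none := by
  constructor
  · rw [nslSpec, List.find?_eq_none]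
    intro j hj
    have hjlt : j < i := by simpa using hj
    have := min_le_gi a t hmin j (by omega)
    simp only [decide_eq_true_eq]
    omega
  · rw [nsrSpec, List.find?_eq_none]
    intro j hj
    have hjr := List.mem_range'.mp hj
    have := min_le_gi a t hmin j (by omega)
    simp only [decide_eq_true_eq]
    omega

lemma nslSpec_bounds {a : List Int} {i l : Nat} (h : nslSpec a i = some l) :
    l < i ∧ gi a l < gi a i := by
  have hm := List.mem_of_find?_eq_some h
  have hp := List.find?_some h
  simp only [decide_eq_true_eq] at hp
  exact ⟨by simpa using hm, hp⟩

lemma nsrSpec_bounds {a : List Int} {i r : Nat} (h : nsrSpec a i = some r) :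
    i < r ∧ r < a.length ∧ gi a r < gi a i := by
  have hm := List.mem_of_find?_eq_some h
  have hp := List.find?_some h
  simp only [decide_eq_true_eq] at hp
  have := List.mem_range'.mp hm
  exact ⟨by omega, by omega, hp⟩

lemma entry_eq (a : List Int) (t : Int)
    (hmin : PySem.List.min? a (fun y => y) = some t) (i : Nat) (hi : i < a.length) :
    (if gi a i = t then -1
      else
        let t1 : Option Nat := if i + 1 < a.length then scanR a (gi a i) (i + 1) else none
        let t2 : Option Nat := if 1 ≤ i then scanL a (gi a i) (i - 1) else none
        match t1, t2 with
        | none, some l => (l : Int)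
        | some r, none => (r : Int)
        | some r, some l =>
          if (r : Int) - (i : Int) > (i : Int) - (l : Int) then (l : Int)
          else if (r : Int) - (i : Int) < (i : Int) - (l : Int) then (r : Int)
          else if gi a r > gi a l then (l : Int)
          else if gi a l > gi a r then (r : Int)
          else (l : Int)
        | none, none => -1)
    = (let l := optVal (nslSpec a i)
       let r := optVal (nsrSpec a i)
       if l < 0 ∧ r < 0 then -1
       else if r < 0 then l
       else if l < 0 then r
       else if (i : Int) - l < r - (i : Int) then l
       else if r - (i : Int) < (i : Int) - l then r
       else if gi a l.toNat ≤ gi a r.toNat then l else r) := by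
  have ht1 : (if i + 1 < a.length then scanR a (gi a i) (i + 1) else none) = nsrSpec a i := by
    by_cases h : i + 1 < a.length
    · rw [if_pos h, scanR_eq a _ (a.length - (i + 1)) (i + 1) rfl, nsrSpec]
    · rw [if_neg h, nsrSpec]
      have : a.length - (i + 1) = 0 := by omega
      rw [this]
      simp
  have ht2 : (if 1 ≤ i then scanL a (gi a i) (i - 1) else none) = nslSpec a i := by
    by_cases h : 1 ≤ i
    · rw [if_pos h, scanL_eq a _ (i - 1), nslSpec]
      have : i - 1 + 1 = i := by omega
      rw [this]
    · rw [if_neg h, nslSpec]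
      have : i = 0 := by omega
      subst this
      simp
  rw [ht1, ht2]
  by_cases hmt : gi a i = t
  · obtain ⟨h1, h2⟩ := spec_none_of_min a t hmin i hi hmt
    rw [if_pos hmt, h1, h2]
    norm_num [optVal]
  · rw [if_neg hmt]
    rcases hr : nsrSpec a i with _ | r <;> rcases hl : nslSpec a i with _ | l
    · norm_num [optVal]
    · obtain ⟨hl1, hl2⟩ := nslSpec_bounds hl
      simp only [optVal]
      rw [if_neg (by omega), if_pos (by norm_num)]
    · obtain ⟨hr1, hr2, hr3⟩ := nsrSpec_bounds hr
      simp only [optVal]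
      rw [if_neg (by omega), if_neg (by omega), if_pos (by norm_num)]
    · obtain ⟨hl1, hl2⟩ := nslSpec_bounds hl
      obtain ⟨hr1, hr2, hr3⟩ := nsrSpec_bounds hr
      simp only [optVal, Int.toNat_natCast]
      rw [if_neg (show ¬((l:Int) < 0 ∧ (r:Int) < 0) by omega),
          if_neg (show ¬((r:Int) < 0) by omega),
          if_neg (show ¬((l:Int) < 0) by omega)]
      by_cases hd1 : (r : Int) - (i : Int) > (i : Int) - (l : Int)
      · rw [if_pos hd1, if_pos (show (i:Int) - (l:Int) < (r:Int) - (i:Int) by omega)]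
      · rw [if_neg hd1]
        by_cases hd2 : (r : Int) - (i : Int) < (i : Int) - (l : Int)
        · rw [if_pos hd2, if_neg (show ¬((i:Int) - (l:Int) < (r:Int) - (i:Int)) by omega),
              if_pos (show (r:Int) - (i:Int) < (i:Int) - (l:Int) by omega)]
        · rw [if_neg hd2, if_neg (show ¬((i:Int) - (l:Int) < (r:Int) - (i:Int)) by omega),
              if_neg (show ¬((r:Int) - (i:Int) < (i:Int) - (l:Int)) by omega)]
          rcases lt_trichotomy (gi a l) (gi a r) with hv | hv | hv
          · rw [if_pos (show gi a r > gi a l by omega), if_pos (show gi a l ≤ gi a r by omega)]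
          · rw [if_neg (show ¬(gi a r > gi a l) by omega),
                if_neg (show ¬(gi a l > gi a r) by omega),
                if_pos (show gi a l ≤ gi a r by omega)]
          · rw [if_neg (show ¬(gi a r > gi a l) by omega),
                if_pos (show gi a l > gi a r by omega),
                if_neg (show ¬(gi a l ≤ gi a r) by omega)]

theorem main_eq (a : List Int) (ha : a ≠ []) :
    nearestSmallestTower a = nearestSmallestTower_alt a := by
  obtain ⟨t, hmin⟩ : ∃ t, PySem.List.min? a (fun y => y) = some t := by
    cases hm : PySem.List.min? a (fun y => y) with
    | none => exact absurd ((PySem.List.min?_eq_none_iff a _).mp hm) ha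
    | some t => exact ⟨t, rfl⟩
  rw [nearestSmallestTower, hmin, nearestSmallestTower_alt]
  simp only [nsl_eq, nsr_eq]
  refine List.map_congr_left ?_
  intro i hi
  have hi' : i < a.length := List.mem_range.mp hi
  simp only [mapRange_getD hi']
  exact entry_eq a t hmin i hi'

-- ===== VERDICT (by name: the statement is the Claim_ definition above) =====
theorem nearestSmallestTower_spec : Claim_equal_nearestSmallestTower := by
  intro a _ hpre
  exact main_eq a hpre
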